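-- pv_equiv track=rewrite | github.com/Ganesh9876543/NigamaConnect_flask | build_family_relationships.py | get_father_siblings_with_gender
-- ===== SOURCE A (Python) =====
-- from typing import List, Dict, Optional, Union, Any
--
-- def get_father_siblings_with_gender(
--     father: Optional[Dict[str, Any]],
--     family_map: Dict[str, Dict[str, Any]],
--     family_data: List[Dict[str, Any]]
-- ) -> List[Dict[str, Any]]:
--     """Get father's siblings with their gender information."""
--     if not father:
--         return []
--
--     father_siblings = get_siblings(father, family_map)
--     return [
--         {
--             'id': sib_id,
--             'gender': family_map[sib_id].get('gender'),
--             'spouse': family_map[sib_id].get('spouse')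
--         }
--         for sib_id in father_siblings
--     ]
--
-- def get_parents(
--     person: Optional[Dict[str, Any]],
--     family_map: Dict[str, Dict[str, Any]]
-- ) -> List[str]:
--     """Get all parents of a person."""
--     if not person:
--         return []
--
--     result = []
--     if person.get('parentId'):
--         parent = family_map.get(person['parentId'])
--         if parent:
--             result.append(parent['id'])
--             if parent.get('spouse'):
--                 result.append(parent['spouse'])
--
--     return result
--
-- def get_siblings(
--     person: Optional[Dict[str, Any]],
--     family_map: Dict[str, Dict[str, Any]]
-- ) -> List[str]:
--     """Get all siblings of a person."""
--     if not person or not person.get('parentId'):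
--         return []
--
--     parents = get_parents(person, family_map)
--     return [
--         p['id'] for p in family_map.values()
--         if p['id'] != person['id'] and p.get('parentId') in parents
--     ]
-- ===== SOURCE B (Python) =====
-- def get_father_siblings_with_gender(father, family_map, family_data):
--     """Father's siblings via a parentId->children index, merged by original position."""
--     if not father:
--         return []
--     pid = father.get('parentId')
--     if not pid:
--         return []
--     parents = []
--     parent = family_map.get(pid)
--     if parent:
--         parents.append(parent['id'])
--         sp = parent.get('spouse')
--         if sp and sp not in parents:
--             parents.append(sp)
--     fid = father['id']
--     children = {}
--     for idx, p in enumerate(family_map.values()):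
--         if p['id'] != fid:
--             children.setdefault(p.get('parentId'), []).append((idx, p['id']))
--     groups = []
--     for par in parents:
--         groups.extend(children.get(par, []))
--     out = []
--     for _, sid in sorted(groups, key=lambda t: t[0]):
--         rec = family_map[sid]
--         out.append({'id': sid, 'gender': rec.get('gender'), 'spouse': rec.get('spouse')})
--     return out
-- ===== Notes on version B (the rewrite author's own statement) =====
-- stated objective: alternative
-- what changed: Replaces A's membership scan (filter all family_map values against a parent-id list, then map ids to records) by a parentId -> [(position, id)] index built in one grouping pass, concatenating the (at most two) parents' child groups and restoring A's output order by sorting on the recorded position.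
-- outside the precondition, e.g. on get_father_siblings_with_gender({'parentId': 'p'}, {}, []): A returns [], B raises KeyError
import Mathlib
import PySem

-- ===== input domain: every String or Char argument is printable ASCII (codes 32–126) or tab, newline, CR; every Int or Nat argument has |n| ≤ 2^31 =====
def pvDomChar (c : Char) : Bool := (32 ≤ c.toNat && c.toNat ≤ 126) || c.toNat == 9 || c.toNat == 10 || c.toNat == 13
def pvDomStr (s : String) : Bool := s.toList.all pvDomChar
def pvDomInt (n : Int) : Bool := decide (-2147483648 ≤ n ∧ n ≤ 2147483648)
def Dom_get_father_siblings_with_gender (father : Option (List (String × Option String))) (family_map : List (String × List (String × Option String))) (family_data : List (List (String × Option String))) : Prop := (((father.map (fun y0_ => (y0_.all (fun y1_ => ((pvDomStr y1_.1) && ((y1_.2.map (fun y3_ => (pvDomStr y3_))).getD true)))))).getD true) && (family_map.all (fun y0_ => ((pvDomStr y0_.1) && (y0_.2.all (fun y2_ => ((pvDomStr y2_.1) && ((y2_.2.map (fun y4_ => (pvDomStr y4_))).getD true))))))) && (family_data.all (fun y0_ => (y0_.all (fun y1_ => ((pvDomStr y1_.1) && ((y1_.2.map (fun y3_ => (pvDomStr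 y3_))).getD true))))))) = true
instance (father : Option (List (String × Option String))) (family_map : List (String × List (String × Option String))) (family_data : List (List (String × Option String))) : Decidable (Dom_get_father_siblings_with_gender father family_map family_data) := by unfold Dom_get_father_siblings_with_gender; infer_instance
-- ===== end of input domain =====

-- B replaces A's linear membership scan (filter family_map.values() against a parent-id list,
-- then map the ids) by a parentId -> [(position, id)] index built once, concatenating the two
-- parents' child groups and restoring A's output order by sorting on the recorded position
-- (objective: alternative; same asymptotic cost on these tiny parent sets).

-- ===== PORT A =====
-- Python truthiness of an Optional[str] value (None and "" are falsy)
def pvTruthy : Option String → Bool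
  | some s => !(s == "")
  | none => false

-- d.get(k) read as a Python Optional[str] value: a missing key and an explicit None both give none.
-- d[k] (item access) is ported by the same helper: it is exact whenever the key is present
-- (Pre_ guarantees presence at every item-access site; a missing key is a Python KeyError).
def pvGet (d : List (String × Option String)) (k : String) : Option String :=
  (List.lookup k d).join

-- get_parents: parents of a person (a list of Python Optional[str] values)
def get_parents (person : Option (List (String × Option String))) (family_map : List (String × List (String × Option String))) : List (Option String) :=
  match person with
  | none => []
  | some p =>
    if p.isEmpty then []    -- "if not person" (empty dict is falsy)
    else if pvTruthy (pvGet p "parentId") then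
      -- family_map.get(person['parentId']); under the truthy guard the key is some pid (getD "" unreachable)
      match List.lookup ((pvGet p "parentId").getD "") family_map with
      | some parent =>
        if parent.isEmpty then []    -- "if parent:" (empty dict is falsy)
        else pvGet parent "id" ::
             (if pvTruthy (pvGet parent "spouse") then [pvGet parent "spouse"] else [])
      | none => []
    else []

-- get_siblings: ids of the person's siblings
def get_siblings (person : Option (List (String × Option String))) (family_map : List (String × List (String × Option String))) : List (Option String) :=
  match person with
  | none => []
  | some p =>
    if p.isEmpty || !(pvTruthy (pvGet p "parentId")) then []
    else
      let parents := get_parents (some p) family_map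
      ((family_map.map Prod.snd).filter
          (fun q => (pvGet q "id" != pvGet p "id") && parents.contains (pvGet q "parentId"))).map
        (fun q => pvGet q "id")

-- family_map[sib_id]: exact under Pre_ (sib_id is a string key of family_map there)
def pvMapItem (family_map : List (String × List (String × Option String))) (sid : Option String) : List (String × Option String) :=
  match sid with
  | some s => (List.lookup s family_map).getD []
  | none => []

def get_father_siblings_with_gender (father : Option (List (String × Option String))) (family_map : List (String × List (String × Option String))) (family_data : List (List (String × Option String))) : List (List (String × Option String)) :=
  match father with
  | none => []
  | some f =>
    if f.isEmpty then []
    else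
      (get_siblings (some f) family_map).map (fun sid =>
        [("id", sid),
         ("gender", pvGet (pvMapItem family_map sid) "gender"),
         ("spouse", pvGet (pvMapItem family_map sid) "spouse")])

-- ===== PORT B =====
-- the result record built for a sibling id (B's loop body over the position-sorted groups)
def pvEmit (family_map : List (String × List (String × Option String))) (sid : Option String) : List (String × Option String) :=
  [("id", sid),
   ("gender", pvGet (pvMapItem family_map sid) "gender"),
   ("spouse", pvGet (pvMapItem family_map sid) "spouse")]

def get_father_siblings_with_gender_alt (father : Option (List (String × Option String))) (family_map : List (String × List (String × Option String))) (family_data : List (List (String × Option String))) : List (List (String × Option String)) :=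
  match father with
  | none => []
  | some f =>
    if f.isEmpty then []
    else
      match pvGet f "parentId" with
      | none => []
      | some pid =>
        if pid == "" then []
        else
          let parents : List (Option String) :=
            match List.lookup pid family_map with
            | none => []
            | some parent =>
              if parent.isEmpty then []
              else
                let p0 := [pvGet parent "id"]
                let sp := pvGet parent "spouse"
                if pvTruthy sp && !(p0.contains sp) then p0 ++ [sp] else p0
          let fid := pvGet f "id"
          -- index: parentId -> [(original position, id)], father's own records skipped
          let children : PySem.Dict (Option String) (List (Int × Option String)) :=
            (PySem.List.enumerate (family_map.map Prod.snd) 0).foldl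
              (fun d ip =>
                if pvGet ip.2 "id" != fid then
                  d.modify (pvGet ip.2 "parentId") [] (fun s => s ++ [(ip.1, pvGet ip.2 "id")])
                else d)
              PySem.Dict.empty
          let groups := parents.foldl (fun g par => g ++ children.getD par []) []
          (PySem.List.sorted groups (fun t => t.1) false).map (fun t => pvEmit family_map t.2)

-- ===== PRECONDITION & SPEC =====
-- Pre_ excludes the inputs on which A raises KeyError (father or a family_map value missing
-- 'id', or a sibling's id not a string key of family_map); the membership requirement is
-- stated for every family_map value, which also excludes a few malformed maps on which A
-- still returns (see cites).
def Pre_get_father_siblings_with_gender (father : Option (List (String × Option String))) (family_map : List (String × List (String × Option String))) (family_data : List (List (String × Option String))) : Prop :=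
  (match father with
   | none => true
   | some f =>
     if f.isEmpty || !(pvTruthy (pvGet f "parentId")) then true
     else
       (List.lookup "id" f).isSome &&
       family_map.all (fun kv =>
         match List.lookup "id" kv.2 with
         | some (some s) => (List.lookup s family_map).isSome
         | _ => false)) = true
instance (father : Option (List (String × Option String))) (family_map : List (String × List (String × Option String))) (family_data : List (List (String × Option String))) : Decidable (Pre_get_father_siblings_with_gender father family_map family_data) := by unfold Pre_get_father_siblings_with_gender; infer_instance

def pvWitness_get_father_siblings_with_gender : (Option (List (String × Option String))) × (List (String × List (String × Option String))) × (List (List (String × Option String))) :=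
  (some [("id", some "f"), ("parentId", some "p")],
   [("p", [("id", some "p")]),
    ("f", [("id", some "f"), ("parentId", some "p")]),
    ("s1", [("id", some "s1"), ("parentId", some "p"), ("gender", some "M")])],
   [])

def Spec_get_father_siblings_with_gender (father : Option (List (String × Option String))) (family_map : List (String × List (String × Option String))) (family_data : List (List (String × Option String))) (out : List (List (String × Option String))) : Prop := out = get_father_siblings_with_gender_alt father family_map family_data
instance (father : Option (List (String × Option String))) (family_map : List (String × List (String × Option String))) (family_data : List (List (String × Option String))) (out : List (List (String × Option String))) : Decidable (Spec_get_father_siblings_with_gender father family_map family_data out) := by unfold Spec_get_father_siblings_with_gender; infer_instance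

-- ===== CLAIM (what is proved, stated in full; the proofs are below) =====
def Claim_equal_get_father_siblings_with_gender : Prop := ∀ (father : Option (List (String × Option String))) (family_map : List (String × List (String × Option String))) (family_data : List (List (String × Option String))), Dom_get_father_siblings_with_gender father family_map family_data → Pre_get_father_siblings_with_gender father family_map family_data → Spec_get_father_siblings_with_gender father family_map family_data (get_father_siblings_with_gender father family_map family_data)

-- ===== LEMMAS AND PROOFS =====

-- B's index-building fold, characterised: the group stored under key k is exactly the
-- position-annotated sublist of the enumerated values whose parentId is k (father skipped).
theorem children_getD (l : List (List (String × Option String))) (fid : Option String) (n : Int)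
    (d0 : PySem.Dict (Option String) (List (Int × Option String))) (k : Option String) :
    ((PySem.List.enumerate l n).foldl
        (fun d ip =>
          if pvGet ip.2 "id" != fid then
            d.modify (pvGet ip.2 "parentId") [] (fun s => s ++ [(ip.1, pvGet ip.2 "id")])
          else d) d0).getD k []
      = d0.getD k []
        ++ ((PySem.List.enumerate l n).filter
              (fun ip => (pvGet ip.2 "id" != fid) && (pvGet ip.2 "parentId" == k))).map
             (fun ip => (ip.1, pvGet ip.2 "id")) := by
  induction l generalizing n d0 with
  | nil => simp [PySem.List.enumerate]
  | cons p t ih =>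
    rw [PySem.List.enumerate_cons]
    simp only [List.foldl_cons, List.filter_cons]
    by_cases hid : (pvGet p "id" != fid) = true
    · rw [if_pos hid, ih]
      by_cases hk : (pvGet p "parentId") = k
      · subst hk
        rw [PySem.Dict.getD_modify_self]
        simp [hid]
      · rw [PySem.Dict.getD_modify_of_ne _ _ _ (fun h => hk h.symm)]
        have hbeq : (pvGet p "parentId" == k) = false := by simp [hk]
        simp [hid, hbeq]
    · rw [if_neg hid, ih]
      have h0 : (pvGet p "id" != fid) = false := by
        revert hid; cases (pvGet p "id" != fid) <;> simp
      simp [h0]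

-- disjoint filters concatenate to the filter of the disjunction, up to permutation
theorem filter_append_filter_perm {α : Type} (l : List α) (P Q : α → Bool)
    (h : ∀ x, P x = true → Q x = false) :
    (l.filter P ++ l.filter Q).Perm (l.filter (fun x => P x || Q x)) := by
  induction l with
  | nil => simp
  | cons x t ih =>
    simp only [List.filter_cons]
    by_cases hP : P x = true
    · simp only [hP, h x hP, Bool.true_or, if_true, List.cons_append]
      exact (ih.cons x)
    · simp only [Bool.not_eq_true] at hP
      by_cases hQ : Q x = true
      · simp only [hP, hQ, Bool.false_or, if_true]
        exact (List.perm_middle).trans (ih.cons x)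
      · simp only [Bool.not_eq_true] at hQ
        simp only [hP, hQ, Bool.false_or]
        exact ih

-- concatenating the groups of a duplicate-free key list permutes to one membership filter
theorem flatMap_groups_perm {α κ : Type} [BEq κ] [LawfulBEq κ] (l : List α) (keys : List κ)
    (hnd : keys.Nodup) (key : α → κ) (C : α → Bool) :
    (keys.flatMap (fun k => l.filter (fun x => C x && (key x == k)))).Perm
      (l.filter (fun x => C x && keys.contains (key x))) := by
  induction keys with
  | nil => simp
  | cons k ks ih =>
    simp only [List.nodup_cons] at hnd
    simp only [List.flatMap_cons]
    refine ((ih hnd.2).append_left _).trans ?_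
    refine (filter_append_filter_perm l _ _ ?_).trans ?_
    · intro x hx
      simp only [Bool.and_eq_true, beq_iff_eq] at hx
      have hm : ks.contains (key x) = false := by
        rw [hx.2, List.contains_eq_mem]
        simp [hnd.1]
      show (C x && ks.contains (key x)) = false
      rw [hm, Bool.and_false]
    · apply List.Perm.of_eq
      apply List.filter_congr
      intro x _
      simp [Bool.and_or_distrib_left]

-- a filter over the enumeration testing only the element, then projecting, is a plain filter
theorem filter_enumerate_snd {α β : Type} (l : List α) (n : Int) (C : α → Bool) (g : α → β) :
    (((PySem.List.enumerate l n).filter (fun ip => C ip.2)).map (fun ip => g ip.2))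
      = (l.filter C).map g := by
  induction l generalizing n with
  | nil => simp [PySem.List.enumerate]
  | cons x t ih =>
    rw [PySem.List.enumerate_cons]
    simp only [List.filter_cons]
    by_cases h : C x = true
    · simp [h, ih]
    · simp only [Bool.not_eq_true] at h; simp [h, ih]

-- the master pipeline lemma: B's index/concat/sort pipeline equals A's filter/map pipeline
-- whenever B's parent list is duplicate-free and agrees with A's as a membership test
theorem pipeline_eq (family_map : List (String × List (String × Option String)))
    (fid : Option String) (pA pB : List (Option String))
    (hnd : pB.Nodup) (hc : ∀ x, pA.contains x = pB.contains x) :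
    (PySem.List.sorted
        (pB.foldl (fun g par =>
          g ++ (((PySem.List.enumerate (family_map.map Prod.snd) 0).foldl
              (fun d ip =>
                if pvGet ip.2 "id" != fid then
                  d.modify (pvGet ip.2 "parentId") [] (fun s => s ++ [(ip.1, pvGet ip.2 "id")])
                else d)
              PySem.Dict.empty).getD par [])) [])
        (fun t => t.1) false).map (fun t => pvEmit family_map t.2)
      = (((family_map.map Prod.snd).filter
            (fun q => (pvGet q "id" != fid) && pA.contains (pvGet q "parentId"))).map
           (fun q => pvGet q "id")).map (pvEmit family_map) := by
  have hgroups :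
      (pB.foldl (fun g par =>
          g ++ (((PySem.List.enumerate (family_map.map Prod.snd) 0).foldl
              (fun d ip =>
                if pvGet ip.2 "id" != fid then
                  d.modify (pvGet ip.2 "parentId") [] (fun s => s ++ [(ip.1, pvGet ip.2 "id")])
                else d)
              PySem.Dict.empty).getD par [])) [])
        = (pB.flatMap (fun k =>
            (PySem.List.enumerate (family_map.map Prod.snd) 0).filter
              (fun ip => (pvGet ip.2 "id" != fid) && (pvGet ip.2 "parentId" == k)))).map
            (fun ip => (ip.1, pvGet ip.2 "id")) := by
    rw [PySem.List.foldl_append_eq_flatMap, List.nil_append, List.map_flatMap]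
    congr 1
    funext k
    rw [children_getD]
    simp [PySem.Dict.getD, PySem.Dict.get?, PySem.Dict.empty]
  rw [hgroups]
  have hperm :
      ((((PySem.List.enumerate (family_map.map Prod.snd) 0).filter
          (fun ip => (pvGet ip.2 "id" != fid) && pB.contains (pvGet ip.2 "parentId"))).map
          (fun ip => (ip.1, pvGet ip.2 "id"))).Perm
        ((pB.flatMap (fun k =>
            (PySem.List.enumerate (family_map.map Prod.snd) 0).filter
              (fun ip => (pvGet ip.2 "id" != fid) && (pvGet ip.2 "parentId" == k)))).map
            (fun ip => (ip.1, pvGet ip.2 "id")))) :=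
    (List.Perm.map _ (flatMap_groups_perm
      (PySem.List.enumerate (family_map.map Prod.snd) 0) pB hnd
      (fun ip => pvGet ip.2 "parentId") (fun ip => pvGet ip.2 "id" != fid))).symm
  have hpw :
      ((((PySem.List.enumerate (family_map.map Prod.snd) 0).filter
          (fun ip => (pvGet ip.2 "id" != fid) && pB.contains (pvGet ip.2 "parentId"))).map
          (fun ip => (ip.1, pvGet ip.2 "id"))).Pairwise (fun a b => a.1 < b.1)) := by
    refine List.Pairwise.map _ (fun a b hab => ?_)
      ((PySem.List.pairwise_lt_enumerate (family_map.map Prod.snd) 0).filter _)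
    exact hab
  rw [PySem.List.sorted_eq_of_perm_of_pairwise_lt _ _ _ hperm hpw]
  have hfil : (family_map.map Prod.snd).filter
        (fun q => (pvGet q "id" != fid) && pA.contains (pvGet q "parentId"))
      = (family_map.map Prod.snd).filter
        (fun q => (pvGet q "id" != fid) && pB.contains (pvGet q "parentId")) :=
    List.filter_congr (fun q _ => by rw [hc])
  rw [hfil, List.map_map, List.map_map]
  exact filter_enumerate_snd (family_map.map Prod.snd) 0
    (fun q => (pvGet q "id" != fid) && pB.contains (pvGet q "parentId"))
    (fun q => pvEmit family_map (pvGet q "id"))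

-- ===== VERDICT (by name: the statement is the Claim_ definition above) =====
theorem get_father_siblings_with_gender_spec : Claim_equal_get_father_siblings_with_gender := by
  intro father family_map family_data _hdom _hpre
  unfold Spec_get_father_siblings_with_gender
  cases father with
  | none => rfl
  | some f =>
    by_cases hemp : f.isEmpty
    · simp [get_father_siblings_with_gender, get_father_siblings_with_gender_alt, hemp]
    · cases hpid : pvGet f "parentId" with
      | none =>
        simp [get_father_siblings_with_gender, get_father_siblings_with_gender_alt,
              get_siblings, pvTruthy, hemp, hpid]
      | some pid =>
        by_cases hpe : pid = ""
        · simp [get_father_siblings_with_gender, get_father_siblings_with_gender_alt,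
                get_siblings, pvTruthy, hemp, hpid, hpe]
        · have htr' : pvTruthy (some pid) = true := by simp [pvTruthy, hpe]
          simp only [get_father_siblings_with_gender, get_father_siblings_with_gender_alt,
                     get_siblings, get_parents, hemp, hpid, htr', hpe, Option.getD_some,
                     beq_iff_eq, Bool.not_true, Bool.or_false,
                     Bool.false_eq_true, if_false, if_true]
          cases hlk : List.lookup pid family_map with
          | none =>
            exact (pipeline_eq family_map (pvGet f "id") [] []
              (by simp) (fun x => rfl)).symm
          | some parent =>
            by_cases hpemp : parent.isEmpty
            · simp only [hpemp, if_true]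
              exact (pipeline_eq family_map (pvGet f "id") [] []
                (by simp) (fun x => rfl)).symm
            · by_cases hsp : pvTruthy (pvGet parent "spouse") = true
              · by_cases heq : pvGet parent "spouse" = pvGet parent "id"
                · -- spouse equals the parent id: A keeps a duplicate, B dedups
                  have hct : ([pvGet parent "id"].contains (pvGet parent "spouse")) = true := by
                    simp [heq]
                  simp only [hpemp, hsp, hct, Bool.not_true, Bool.and_false,
                             Bool.false_eq_true, if_false, if_true]
                  exact (pipeline_eq family_map (pvGet f "id")
                    [pvGet parent "id", pvGet parent "spouse"] [pvGet parent "id"]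
                    (by simp)
                    (fun x => by simp [heq])).symm
                · have hbne : ([pvGet parent "id"].contains (pvGet parent "spouse")) = false := by
                    simp [heq]
                  simp only [hpemp, hsp, hbne, if_false, if_true,
                             Bool.false_eq_true, Bool.not_false, Bool.and_true]
                  exact (pipeline_eq family_map (pvGet f "id")
                    [pvGet parent "id", pvGet parent "spouse"]
                    [pvGet parent "id", pvGet parent "spouse"]
                    (by simp [Ne.symm heq]) (fun x => rfl)).symm
              · simp only [Bool.not_eq_true] at hsp
                simp only [hpemp, hsp, if_false, Bool.false_eq_true, Bool.false_and]
                exact (pipeline_eq family_map (pvGet f "id")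
                  [pvGet parent "id"] [pvGet parent "id"]
                  (by simp) (fun x => rfl)).symm
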